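-- pv_equiv track=rewrite | github.com/fuboyi314/porous_reconstruction_system | app/core/analyzer.py | _overall_evaluation
-- ===== SOURCE A (Python) =====
-- from typing import Any, Mapping
--
-- def _overall_evaluation(entries: list[dict[str, Any]]) -> str:
--     """根据可用指标生成总体评价。"""
--     available = [entry for entry in entries if entry["status"] in {"matched", "higher", "lower"}]
--     if not available:
--         return "总体上，由于有效指标不足，当前仅能完成结果记录，尚不宜给出完整结构评价。"
--
--     matched = sum(entry["status"] == "matched" for entry in available)
--     higher = sum(entry["status"] == "higher" for entry in available)
--     lower = sum(entry["status"] == "lower" for entry in available)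
--
--     if matched >= max(1, len(available) - 1):
--         return "总体上，本次重构结果与目标结构参数较为接近，可作为后续模型调优与样本筛选的候选结果。"
--     if higher > lower:
--         return "总体上，重构结果在多个指标上偏高，说明生成结构可能较为疏松或界面复杂度偏大，建议加强目标约束或调整后处理参数。"
--     if lower > higher:
--         return "总体上，重构结果在多个指标上偏低，说明生成结构可能偏致密或连通性不足，建议提高模型对目标条件的响应能力。"
--     return "总体上，各指标偏差方向不完全一致，说明结构特征已部分接近目标，但仍需结合训练样本和后处理策略进一步修正。"
-- ===== SOURCE B (Python) =====
-- def _overall_evaluation(entries: list[dict[str, object]]) -> str: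
--     """根据可用指标生成总体评价。"""
--     # Rewritten decision logic: the threshold matched >= max(1, len(available) - 1)
--     # is equivalent to "at least one matched and at most one deviating metric",
--     # and the higher/lower comparison collapses to the sign of a signed balance.
--     matched = deviations = balance = 0
--     for entry in entries:
--         status = entry["status"]
--         if status == "matched":
--             matched += 1
--         elif status == "higher":
--             deviations += 1
--             balance += 1
--         elif status == "lower":
--             deviations += 1
--             balance -= 1
--     if matched == 0 and deviations == 0:
--         return "总体上，由于有效指标不足，当前仅能完成结果记录，尚不宜给出完整结构评价。"
--     if matched and deviations <= 1:
--         return "总体上，本次重构结果与目标结构参数较为接近，可作为后续模型调优与样本筛选的候选结果。"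
--     if balance > 0:
--         return "总体上，重构结果在多个指标上偏高，说明生成结构可能较为疏松或界面复杂度偏大，建议加强目标约束或调整后处理参数。"
--     if balance < 0:
--         return "总体上，重构结果在多个指标上偏低，说明生成结构可能偏致密或连通性不足，建议提高模型对目标条件的响应能力。"
--     return "总体上，各指标偏差方向不完全一致，说明结构特征已部分接近目标，但仍需结合训练样本和后处理策略进一步修正。"
-- ===== Notes on version B (the rewrite author's own statement) =====
-- stated objective: alternative
-- what changed: The decision logic is restated algebraically: instead of a filtered list with three category counts and the matched >= max(1, len-1) threshold, one pass keeps a matched count, a count of deviating metrics and a signed balance (+1 higher, -1 lower); the threshold branch becomes 'at least one matched and at most one deviation' and the direction branches become the sign of the balance.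
import Mathlib
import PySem

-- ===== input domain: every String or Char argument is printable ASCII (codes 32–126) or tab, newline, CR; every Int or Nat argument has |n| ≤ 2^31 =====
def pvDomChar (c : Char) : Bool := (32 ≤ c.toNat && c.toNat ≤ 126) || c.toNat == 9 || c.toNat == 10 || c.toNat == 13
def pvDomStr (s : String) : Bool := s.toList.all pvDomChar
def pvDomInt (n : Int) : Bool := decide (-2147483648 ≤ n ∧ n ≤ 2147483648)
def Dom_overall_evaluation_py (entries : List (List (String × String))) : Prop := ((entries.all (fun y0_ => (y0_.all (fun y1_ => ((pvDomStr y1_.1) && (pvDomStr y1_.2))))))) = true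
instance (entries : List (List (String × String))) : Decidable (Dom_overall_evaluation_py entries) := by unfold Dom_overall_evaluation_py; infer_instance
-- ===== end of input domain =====

-- B restates the decision algebraically: one pass keeps matched / deviations / a signed balance, and the
-- matched >= max(1, len-1) threshold becomes "at least one matched, at most one deviation" (objective: alternative).

-- ===== PORT A =====
-- entry["status"] : first-match lookup in the association list; KeyError (lookup = none) is excluded by Pre_.
def pvStatus (e : List (String × String)) : Option String := e.lookup "status"

def overall_evaluation_py (entries : List (List (String × String))) : String :=
  let available := entries.filter (fun e =>
    pvStatus e == some "matched" || pvStatus e == some "higher" || pvStatus e == some "lower")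
  if available = [] then
    "总体上，由于有效指标不足，当前仅能完成结果记录，尚不宜给出完整结构评价。"
  else
    let matched := available.countP (fun e => pvStatus e == some "matched")
    let higher := available.countP (fun e => pvStatus e == some "higher")
    let lower := available.countP (fun e => pvStatus e == some "lower")
    if matched ≥ max 1 (available.length - 1) then
      "总体上，本次重构结果与目标结构参数较为接近，可作为后续模型调优与样本筛选的候选结果。"
    else if higher > lower then
      "总体上，重构结果在多个指标上偏高，说明生成结构可能较为疏松或界面复杂度偏大，建议加强目标约束或调整后处理参数。"
    else if lower > higher then
      "总体上，重构结果在多个指标上偏低，说明生成结构可能偏致密或连通性不足，建议提高模型对目标条件的响应能力。"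
    else
      "总体上，各指标偏差方向不完全一致，说明结构特征已部分接近目标，但仍需结合训练样本和后处理策略进一步修正。"

-- ===== PORT B =====
-- one pass accumulating (matched, deviations, signed balance); missing "status" is excluded by Pre_
def pvTallyStep (acc : Nat × Nat × Int) (e : List (String × String)) : Nat × Nat × Int :=
  match e.lookup "status" with
  | some "matched" => (acc.1 + 1, acc.2.1, acc.2.2)
  | some "higher"  => (acc.1, acc.2.1 + 1, acc.2.2 + 1)
  | some "lower"   => (acc.1, acc.2.1 + 1, acc.2.2 - 1)
  | _              => acc

def overall_evaluation_py_alt (entries : List (List (String × String))) : String :=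
  let t := entries.foldl pvTallyStep (0, 0, 0)
  let matched := t.1
  let deviations := t.2.1
  let balance := t.2.2
  if matched = 0 ∧ deviations = 0 then
    "总体上，由于有效指标不足，当前仅能完成结果记录，尚不宜给出完整结构评价。"
  else if matched ≠ 0 ∧ deviations ≤ 1 then
    "总体上，本次重构结果与目标结构参数较为接近，可作为后续模型调优与样本筛选的候选结果。"
  else if balance > 0 then
    "总体上，重构结果在多个指标上偏高，说明生成结构可能较为疏松或界面复杂度偏大，建议加强目标约束或调整后处理参数。"
  else if balance < 0 then
    "总体上，重构结果在多个指标上偏低，说明生成结构可能偏致密或连通性不足，建议提高模型对目标条件的响应能力。"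
  else
    "总体上，各指标偏差方向不完全一致，说明结构特征已部分接近目标，但仍需结合训练样本和后处理策略进一步修正。"

-- ===== PRECONDITION & SPEC =====
-- Pre_ excludes exactly the entries missing a "status" key, on which Python A (and B) raise KeyError.
def Pre_overall_evaluation_py (entries : List (List (String × String))) : Prop :=
  (entries.all (fun e => (e.lookup "status").isSome)) = true
instance (entries : List (List (String × String))) : Decidable (Pre_overall_evaluation_py entries) := by unfold Pre_overall_evaluation_py; infer_instance

def pvWitness_overall_evaluation_py : (List (List (String × String))) :=
  [[("status", "matched")], [("status", "other")]]

def Spec_overall_evaluation_py (entries : List (List (String × String))) (out : String) : Prop := out = overall_evaluation_py_alt entries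
instance (entries : List (List (String × String))) (out : String) : Decidable (Spec_overall_evaluation_py entries out) := by unfold Spec_overall_evaluation_py; infer_instance

-- ===== CLAIM (what is proved, stated in full; the proofs are below) =====
def Claim_equal_overall_evaluation_py : Prop := ∀ (entries : List (List (String × String))), Dom_overall_evaluation_py entries → Pre_overall_evaluation_py entries → Spec_overall_evaluation_py entries (overall_evaluation_py entries)

-- ===== LEMMAS AND PROOFS =====

def pvIsM (e : List (String × String)) : Bool := pvStatus e == some "matched"
def pvIsH (e : List (String × String)) : Bool := pvStatus e == some "higher"
def pvIsL (e : List (String × String)) : Bool := pvStatus e == some "lower"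
def pvAvail (e : List (String × String)) : Bool := pvIsM e || pvIsH e || pvIsL e

lemma pvTallyStep_eq (acc : Nat × Nat × Int) (e : List (String × String)) :
    pvTallyStep acc e =
      (acc.1 + (if pvIsM e then 1 else 0),
       acc.2.1 + (if pvIsH e then 1 else 0) + (if pvIsL e then 1 else 0),
       acc.2.2 + (if pvIsH e then 1 else 0) - (if pvIsL e then 1 else 0)) := by
  unfold pvTallyStep pvIsM pvIsH pvIsL pvStatus
  rcases h : e.lookup "status" with _ | s
  · simp
  · by_cases hm : s = "matched"
    · subst hm; simp
    · by_cases hh : s = "higher"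
      · subst hh; simp
      · by_cases hl : s = "lower"
        · subst hl; simp
        · simp [hm, hh, hl]

lemma pvFold_tally (entries : List (List (String × String))) :
    ∀ (m d : Nat) (b : Int),
      entries.foldl pvTallyStep (m, d, b) =
        (m + entries.countP pvIsM,
         d + entries.countP pvIsH + entries.countP pvIsL,
         b + (entries.countP pvIsH : Int) - (entries.countP pvIsL : Int)) := by
  induction entries with
  | nil => intro m d b; simp
  | cons e es ih =>
      intro m d b
      simp only [List.foldl_cons, pvTallyStep_eq, List.countP_cons]
      rw [ih]
      by_cases hm : pvIsM e <;> by_cases hh : pvIsH e <;> by_cases hl : pvIsL e <;>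
        simp [hm, hh, hl, Prod.mk.injEq] <;> omega

lemma pvPoint (e : List (String × String)) :
    ((if pvIsM e then 1 else 0) + (if pvIsH e then 1 else 0) + (if pvIsL e then 1 else 0) : Nat) =
      if pvAvail e then 1 else 0 := by
  unfold pvAvail pvIsM pvIsH pvIsL pvStatus
  rcases h : e.lookup "status" with _ | s
  · simp
  · by_cases hm : s = "matched"
    · subst hm; simp
    · by_cases hh : s = "higher"
      · subst hh; simp
      · by_cases hl : s = "lower"
        · subst hl; simp
        · simp [hm, hh, hl]

lemma pvAvail_length (entries : List (List (String × String))) :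
    (entries.filter pvAvail).length =
      entries.countP pvIsM + entries.countP pvIsH + entries.countP pvIsL := by
  induction entries with
  | nil => simp
  | cons e es ih =>
      have hp := pvPoint e
      rw [List.filter_cons]
      simp only [List.countP_cons]
      by_cases hA : pvAvail e
      · rw [if_pos hA, List.length_cons, ih]
        rw [if_pos hA] at hp
        omega
      · rw [if_neg hA, ih]
        rw [if_neg hA] at hp
        omega

lemma pvCount_filter_M (entries : List (List (String × String))) :
    (entries.filter pvAvail).countP pvIsM = entries.countP pvIsM := by
  rw [List.countP_filter]
  apply List.countP_congr
  intro e _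
  unfold pvAvail
  cases hm : pvIsM e <;> simp

lemma pvCount_filter_H (entries : List (List (String × String))) :
    (entries.filter pvAvail).countP pvIsH = entries.countP pvIsH := by
  rw [List.countP_filter]
  apply List.countP_congr
  intro e _
  unfold pvAvail
  cases hh : pvIsH e <;> simp

lemma pvCount_filter_L (entries : List (List (String × String))) :
    (entries.filter pvAvail).countP pvIsL = entries.countP pvIsL := by
  rw [List.countP_filter]
  apply List.countP_congr
  intro e _
  unfold pvAvail
  cases hl : pvIsL e <;> simp

-- ===== VERDICT (by name: the statement is the Claim_ definition above) =====
theorem overall_evaluation_py_spec : Claim_equal_overall_evaluation_py := by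
  intro entries _ _
  unfold Spec_overall_evaluation_py overall_evaluation_py overall_evaluation_py_alt
  have hfold := pvFold_tally entries 0 0 0
  simp only [Nat.zero_add, Int.zero_add] at hfold
  simp only [hfold]
  have hflt : (fun e => pvStatus e == some "matched" || pvStatus e == some "higher" ||
      pvStatus e == some "lower") = pvAvail := by
    funext e; simp [pvAvail, pvIsM, pvIsH, pvIsL]
  simp only [hflt, pvCount_filter_M, pvCount_filter_H, pvCount_filter_L,
    show (fun e => pvStatus e == some "matched") = pvIsM from rfl,
    show (fun e => pvStatus e == some "higher") = pvIsH from rfl,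
    show (fun e => pvStatus e == some "lower") = pvIsL from rfl]
  have hlen := pvAvail_length entries
  set cm := entries.countP pvIsM with hcm
  set ch := entries.countP pvIsH with hch
  set cl := entries.countP pvIsL with hcl
  by_cases hnil : entries.filter pvAvail = []
  · have h0 : cm + ch + cl = 0 := by rw [← hlen, hnil]; rfl
    have : cm = 0 ∧ ch + cl = 0 := by omega
    simp [hnil, this.1, this.2]
  · have hpos : 1 ≤ cm + ch + cl := by
      rw [← hlen]
      have := List.length_pos_iff.mpr hnil
      omega
    rw [if_neg hnil, hlen]
    have hne : ¬ (cm = 0 ∧ ch + cl = 0) := by omega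
    rw [if_neg hne]
    by_cases hcls : cm ≥ max 1 (cm + ch + cl - 1)
    · have : cm ≠ 0 ∧ ch + cl ≤ 1 := by
        constructor <;> omega
      rw [if_pos hcls, if_pos this]
    · have : ¬ (cm ≠ 0 ∧ ch + cl ≤ 1) := by
        intro ⟨h1, h2⟩; omega
      rw [if_neg hcls, if_neg this]
      by_cases hhl : ch > cl
      · have : (ch : Int) - cl > 0 := by omega
        rw [if_pos hhl, if_pos this]
      · rw [if_neg hhl]
        have hb : ¬ ((ch : Int) - cl > 0) := by omega
        rw [if_neg hb]
        by_cases hlh : cl > ch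
        · have : (ch : Int) - cl < 0 := by omega
          rw [if_pos hlh, if_pos this]
        · have : ¬ ((ch : Int) - cl < 0) := by omega
          rw [if_neg hlh, if_neg this]
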